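-- pv_equiv track=rewrite | github.com/cchampernowne/bioinformatics_algorithms | algorithms/nussinov.py | all_dot_brackets
-- ===== SOURCE A (Python) =====
-- def loop_count(dot_bracket):  # check if structure has viable counts of bases between loops
--     loop_list = []
--     if (dot_bracket.count('(') != dot_bracket.count(')')) or '(' not in dot_bracket or ')' not in dot_bracket:
--         return False
--     start = -1
--     for i in range(len(dot_bracket)):
--         if (dot_bracket[i] == '(' or dot_bracket[i] == ')') and start == -1:
--             start = i
--         elif (dot_bracket[i] == '(' or dot_bracket[i] == ')') and start != -1:
--             if i - start < 4 and i - start > 0: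
--                 loop_list.append(False)
--             else:
--                 loop_list.append(True)
--             start = i
--     if False in loop_list:
--         return False
--     return True
--
-- def all_dot_brackets(struct_list):  # change to string format, remove duplicate dot brackets, remove inelligible dot brackets using loop_count()
--     string_list = []
--     for struct in struct_list:
--         dot_bracket = ''
--         for ele in struct[0]:
--             dot_bracket+=ele
--         string_list.append([dot_bracket,struct[1]])
--     temp1_list = []
--     temp2_list = []
--     for ele in string_list:
--         if ele[0] not in temp1_list:
--             temp1_list.append(ele[0])
--             temp2_list.append(ele)
--     final_list = []
--     for ele in temp2_list:
--         if loop_count(ele[0]) == True: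
--             final_list.append(ele)
--     return final_list
-- ===== SOURCE B (Python) =====
-- def loop_count(dot_bracket):
--     # balance / presence guard, then: rewrite both brackets to one marker char and
--     # split on it; every interior dot-run must have length >= 3 (i.e. bracket gap >= 4)
--     if dot_bracket.count('(') != dot_bracket.count(')') or '(' not in dot_bracket or ')' not in dot_bracket:
--         return False
--     segments = dot_bracket.replace(')', '(').split('(')
--     return all(len(seg) >= 3 for seg in segments[1:-1])
--
-- def all_dot_brackets(struct_list):
--     # one dict keyed by the joined string: setdefault keeps the first occurrence in order
--     d = {}
--     for struct in struct_list:
--         d.setdefault(''.join(struct[0]), struct[1])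
--     return [[k, v] for k, v in d.items() if loop_count(k)]
-- ===== Notes on version B (the rewrite author's own statement) =====
-- stated objective: alternative
-- what changed: loop_count is recast as string rewriting: map both bracket kinds to one marker, split on it, and require every interior segment (dot-run) to have length >= 3, replacing A's index-and-last-position scan; the three list passes of all_dot_brackets are replaced by a single dict keyed on the joined string (setdefault keeps the first occurrence) followed by a filtering comprehension over its items.
import Mathlib
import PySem

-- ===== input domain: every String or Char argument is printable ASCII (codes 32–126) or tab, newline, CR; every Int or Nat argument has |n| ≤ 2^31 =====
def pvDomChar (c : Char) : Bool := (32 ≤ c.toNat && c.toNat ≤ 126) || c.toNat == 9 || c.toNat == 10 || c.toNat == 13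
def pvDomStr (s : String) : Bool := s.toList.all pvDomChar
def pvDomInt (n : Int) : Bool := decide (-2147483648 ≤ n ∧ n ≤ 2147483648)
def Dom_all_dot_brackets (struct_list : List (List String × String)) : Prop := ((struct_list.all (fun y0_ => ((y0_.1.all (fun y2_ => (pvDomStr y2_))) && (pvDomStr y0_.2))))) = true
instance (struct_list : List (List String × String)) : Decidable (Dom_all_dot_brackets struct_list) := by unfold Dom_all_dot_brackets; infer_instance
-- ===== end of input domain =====

-- B recasts loop_count as rewrite-both-brackets-to-one-marker + split + interior-segment
-- lengths, and fuses all_dot_brackets' three passes into one dict (setdefault) + a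
-- filtered comprehension over its items; objective: alternative.

-- ===== PORT A =====

def pvIsB (c : Char) : Bool := c == '(' || c == ')'

-- one step of A's `for i in range(len(dot_bracket))` scan, state (start, loop_list)
-- (iterating enumerate(s) yields exactly the (i, s[i]) pairs the range loop indexes)
def pvStepA (p : Int × List Bool) (ic : Int × Char) : Int × List Bool :=
  if pvIsB ic.2 && (p.1 == -1) then (ic.1, p.2)
  else if pvIsB ic.2 && !(p.1 == -1) then
    (ic.1, p.2 ++ [if ic.1 - p.1 < 4 ∧ 0 < ic.1 - p.1 then false else true])
  else p

def loop_count (s : String) : Bool :=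
  if (PySem.Str.count s "(" != PySem.Str.count s ")") || !PySem.Str.isIn "(" s || !PySem.Str.isIn ")" s then
    false
  else
    !(((PySem.List.enumerate s.toList 0).foldl pvStepA (-1, [])).2.contains false)

-- one step of A's dedup loop: `if ele[0] not in temp1_list: append to both lists`
-- (ele[0]: entries are always two-element lists, so the index is in range)
def pvStepDedup (p : List String × List (List String)) (ele : List String) : List String × List (List String) :=
  let k := (PySem.List.pyGet? ele 0).getD ""
  if p.1.contains k then p else (p.1 ++ [k], p.2 ++ [ele])

def all_dot_brackets (struct_list : List (List String × String)) : List (List String) :=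
  let string_list := struct_list.foldl
    (fun acc struct => acc ++ [[struct.1.foldl (fun s e => s ++ e) "", struct.2]]) []
  let tt := string_list.foldl pvStepDedup ([], [])
  tt.2.foldl
    (fun acc ele => if loop_count ((PySem.List.pyGet? ele 0).getD "") == true then acc ++ [ele] else acc) []

-- ===== PORT B =====

def loop_count_alt (s : String) : Bool :=
  if (PySem.Str.count s "(" != PySem.Str.count s ")") || !PySem.Str.isIn "(" s || !PySem.Str.isIn ")" s then
    false
  else
    -- dot_bracket.replace(')', '(').split('(')  — nonempty literal separator; the
    -- segment strings are only measured with len, so we stay on the List Char side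
    (PySem.List.slice (PySem.Chars.splitOn (PySem.Str.replace s ")" "(").toList ['(']) (some 1) (some (-1))).all
      (fun seg => decide (3 ≤ seg.length))

def all_dot_brackets_alt (struct_list : List (List String × String)) : List (List String) :=
  let d : PySem.Dict String String := struct_list.foldl
    (fun d struct => d.setdefault (PySem.Str.join "" struct.1) struct.2) PySem.Dict.empty
  (d.items.filter (fun kv => loop_count_alt kv.1)).map (fun kv => [kv.1, kv.2])

-- ===== PRECONDITION & SPEC =====

def Spec_all_dot_brackets (struct_list : List (List String × String)) (out : List (List String)) : Prop := out = all_dot_brackets_alt struct_list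
instance (struct_list : List (List String × String)) (out : List (List String)) : Decidable (Spec_all_dot_brackets struct_list out) := by unfold Spec_all_dot_brackets; infer_instance

-- ===== CLAIM (what is proved, stated in full; the proofs are below) =====
def Claim_equal_all_dot_brackets : Prop := ∀ (struct_list : List (List String × String)), Dom_all_dot_brackets struct_list → Spec_all_dot_brackets struct_list (all_dot_brackets struct_list)

-- ===== LEMMAS AND PROOFS =====

-- ')'→'(' rewriting, one character
def pvRepl (c : Char) : Char := if c = ')' then '(' else c

-- segments between '(' markers (structural form of split-on-'(')
def pvSegs : List Char → List Char → List (List Char)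
  | [], cur => [cur.reverse]
  | c :: t, cur => if c = '(' then cur.reverse :: pvSegs t [] else pvSegs t (c :: cur)

-- segments between brackets of the ORIGINAL string
def pvS : List Char → List Char → List (List Char)
  | [], cur => [cur.reverse]
  | c :: t, cur => if pvIsB c then cur.reverse :: pvS t [] else pvS t (c :: cur)

-- A's scan, before/after the first bracket, in structural form
def pvPhase2 : List Char → Int → Int → Bool
  | [], _, _ => true
  | c :: t, i, start =>
    if pvIsB c then (!(decide (i - start < 4) && decide (0 < i - start))) && pvPhase2 t (i + 1) i
    else pvPhase2 t (i + 1) start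

def pvPhase1 : List Char → Int → Bool
  | [], _ => true
  | c :: t, i => if pvIsB c then pvPhase2 t (i + 1) i else pvPhase1 t (i + 1)

theorem pvReplace_go (cs : List Char) : ∀ (fuel : Nat) (acc : List Char), cs.length ≤ fuel →
    PySem.Chars.replace.go [')'] ['('] fuel cs acc = acc.reverse ++ cs.map pvRepl := by
  induction cs with
  | nil => intro fuel acc _; cases fuel <;> simp [PySem.Chars.replace.go]
  | cons c t ih =>
    intro fuel acc h
    cases fuel with
    | zero => simp at h
    | succ f =>
      by_cases hc : c = ')'
      · subst hc
        show PySem.Chars.replace.go [')'] ['('] f (List.drop 1 (')'::t)) ('(' :: acc) = _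
        rw [List.drop_one, List.tail_cons, ih f _ (by simpa using h)]
        simp [pvRepl]
      · have hpre : ([')'].isPrefixOf (c :: t)) = false := by
          rw [List.isPrefixOf]; simp [beq_eq_false_iff_ne, Ne.symm hc]
        rw [PySem.Chars.replace.go, if_neg (by simp [hpre]), ih f _ (by simpa using h)]
        simp [pvRepl, hc]

theorem pvReplace_eq (cs : List Char) :
    PySem.Chars.replace cs [')'] ['('] = cs.map pvRepl := by
  rw [PySem.Chars.replace, if_neg (by simp)]
  exact pvReplace_go cs cs.length [] (le_refl _)

theorem pvSplit_go (cs : List Char) : ∀ (fuel : Nat) (cur : List Char) (acc : List (List Char)),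
    cs.length ≤ fuel →
    PySem.Chars.splitOn.go ['('] fuel cs cur acc = acc.reverse ++ pvSegs cs cur := by
  induction cs with
  | nil => intro fuel cur acc _; cases fuel <;> simp [PySem.Chars.splitOn.go, pvSegs]
  | cons c t ih =>
    intro fuel cur acc h
    cases fuel with
    | zero => simp at h
    | succ f =>
      by_cases hc : c = '('
      · subst hc
        have hpre : (['('].isPrefixOf ('(' :: t)) = true := by
          rw [List.isPrefixOf]; simp
        rw [PySem.Chars.splitOn.go, if_pos (by simp [hpre]),
          show List.drop ['('].length ('('::t) = t from rfl,
          ih f _ _ (by simpa using h)]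
        simp [pvSegs]
      · have hpre : (['('].isPrefixOf (c :: t)) = false := by
          rw [List.isPrefixOf]; simp [beq_eq_false_iff_ne, Ne.symm hc]
        rw [PySem.Chars.splitOn.go, if_neg (by simp [hpre]), ih f _ _ (by simpa using h)]
        simp [pvSegs, hc]

theorem pvSplit_eq (cs : List Char) :
    PySem.Chars.splitOn cs ['('] = pvSegs cs [] := by
  rw [PySem.Chars.splitOn, pvSplit_go cs (cs.length + 1) [] [] (by omega)]
  simp

theorem pvSegs_map_repl (cs : List Char) : ∀ cur, pvSegs (cs.map pvRepl) cur = pvS cs cur := by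
  induction cs with
  | nil => intro cur; simp [pvSegs, pvS]
  | cons c t ih =>
    intro cur
    by_cases hb : pvIsB c = true
    · have : pvRepl c = '(' := by
        rcases (by simpa [pvIsB] using hb : c = '(' ∨ c = ')') with h | h <;> simp [pvRepl, h]
      simp [pvSegs, pvS, this, hb, ih]
    · have h1 : pvRepl c = c := by
        simp [pvIsB] at hb; simp [pvRepl, hb.2]
      have h2 : ¬ c = '(' := by simp [pvIsB] at hb; exact hb.1
      simp [pvSegs, pvS, h1, h2, hb, ih]

theorem pvS_ne_nil (cs : List Char) : ∀ cur, pvS cs cur ≠ [] := by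
  induction cs with
  | nil => intro cur; simp [pvS]
  | cons c t ih => intro cur; by_cases hb : pvIsB c <;> simp [pvS, hb, ih]

theorem pvSlice_one_negone {α : Type} (xs : List α) :
    PySem.List.slice xs (some 1) (some (-1)) = xs.tail.dropLast := by
  cases xs with
  | nil => rfl
  | cons x t =>
    simp [PySem.List.slice, PySem.List.clampIdx, List.dropLast_eq_take]
    rw [if_neg (by omega)]
    omega

theorem pvPhase2_segs (t : List Char) : ∀ (cur : List Char) (i start : Int),
    i - start = cur.length + 1 →
    pvPhase2 t i start = ((pvS t cur).dropLast).all (fun s => decide (3 ≤ s.length)) := by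
  induction t with
  | nil => intro cur i start h; simp [pvPhase2, pvS]
  | cons c t ih =>
    intro cur i start h
    by_cases hb : pvIsB c
    · rw [pvPhase2, pvS, if_pos hb, if_pos hb,
        List.dropLast_cons_of_ne_nil (pvS_ne_nil t []), List.all_cons,
        ih [] (i+1) i (by simp)]
      have h1 : (!(decide (i - start < 4) && decide (0 < i - start))) = decide (3 ≤ cur.length) := by
        by_cases h3 : 3 ≤ cur.length
        · have h4 : ¬ (i - start < 4) := by omega
          simp [h3, h4]
        · have h4 : i - start < 4 := by omega
          have h6 : start < i := by omega
          simp [h3, h4, h6]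
      rw [h1]
      simp
    · rw [pvPhase2, pvS, if_neg (by simp [hb]), if_neg (by simp [hb]),
        ih (c :: cur) (i+1) start (by simp; omega)]

theorem pvPhase1_segs (t : List Char) : ∀ (cur : List Char) (i : Int),
    pvPhase1 t i = (((pvS t cur).tail).dropLast).all (fun s => decide (3 ≤ s.length)) := by
  induction t with
  | nil => intro cur i; simp [pvPhase1, pvS]
  | cons c t ih =>
    intro cur i
    by_cases hb : pvIsB c
    · rw [pvPhase1, pvS, if_pos hb, if_pos hb, List.tail_cons,
        pvPhase2_segs t [] (i+1) i (by simp)]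
    · rw [pvPhase1, pvS, if_neg (by simp [hb]), if_neg (by simp [hb]), ih (c :: cur) (i+1)]

theorem pvFoldA_run (cs : List Char) : ∀ (i start : Int) (ll : List Bool), 0 ≤ start → start < i →
    ((PySem.List.enumerate cs i).foldl pvStepA (start, ll)).2.contains false
      = (ll.contains false || !pvPhase2 cs i start) := by
  induction cs with
  | nil => intro i start ll h0 h1; simp [PySem.List.enumerate_nil, pvPhase2]
  | cons c t ih =>
    intro i start ll h0 h1
    rw [PySem.List.enumerate_cons, List.foldl_cons]
    have hne : (start == -1) = false := by simp; omega
    by_cases hb : pvIsB c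
    · rw [pvStepA, if_neg (by simp [hne]), if_pos (by simp [hb, hne]),
        ih (i+1) i _ (by omega) (by omega), pvPhase2, if_pos hb]
      by_cases hcond : i - start < 4 ∧ 0 < i - start
      · simp [hcond, Bool.or_assoc]
      · have : ¬ (i - start < 4) := by
          rcases not_and_or.mp hcond with h | h
          · exact h
          · exact absurd (by omega : 0 < i - start) h
        simp [this]
    · rw [pvStepA, if_neg (by simp [hb]), if_neg (by simp [hb]),
        ih (i+1) start _ h0 (by omega), pvPhase2, if_neg (by simp [hb])]

theorem pvFoldA_pre (cs : List Char) : ∀ (i : Int) (ll : List Bool), 0 ≤ i →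
    ((PySem.List.enumerate cs i).foldl pvStepA (-1, ll)).2.contains false
      = (ll.contains false || !pvPhase1 cs i) := by
  induction cs with
  | nil => intro i ll h0; simp [PySem.List.enumerate_nil, pvPhase1]
  | cons c t ih =>
    intro i ll h0
    rw [PySem.List.enumerate_cons, List.foldl_cons]
    by_cases hb : pvIsB c
    · rw [pvStepA, if_pos (by simp [hb]),
        pvFoldA_run t (i+1) i _ h0 (by omega), pvPhase1, if_pos hb]
    · rw [pvStepA, if_neg (by simp [hb]), if_neg (by simp [hb]),
        ih (i+1) _ (by omega), pvPhase1, if_neg (by simp [hb])]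

theorem pvLoopCount_eq (s : String) : loop_count s = loop_count_alt s := by
  rw [loop_count, loop_count_alt]
  split
  · rfl
  · rw [pvFoldA_pre s.toList 0 [] (le_refl _), PySem.Str.toList_replace,
      show (")" : String).toList = [')'] from rfl, show ("(" : String).toList = ['('] from rfl,
      pvReplace_eq, pvSplit_eq, pvSegs_map_repl, pvSlice_one_negone,
      pvPhase1_segs s.toList [] 0]
    simp

theorem pvJoin_flatten (parts : List (List Char)) : PySem.Chars.join [] parts = parts.flatten := by
  induction parts with
  | nil => simp [PySem.Chars.join_nil]
  | cons p rest ih =>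
    cases rest with
    | nil => simp [PySem.Chars.join_singleton]
    | cons q r => rw [PySem.Chars.join_cons_cons]; simp_all

theorem pvFoldAppend_toList (L : List String) : ∀ (a : String),
    (L.foldl (fun s e => s ++ e) a).toList = a.toList ++ (L.map String.toList).flatten := by
  induction L with
  | nil => intro a; simp
  | cons x t ih => intro a; rw [List.foldl_cons, ih]; simp

theorem pvFoldAppend_join (L : List String) :
    L.foldl (fun s e => s ++ e) "" = PySem.Str.join "" L := by
  apply String.toList_inj.mp
  rw [pvFoldAppend_toList, PySem.Str.toList_join,
    show ("" : String).toList = [] from rfl, pvJoin_flatten]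
  simp

theorem pvKeys_contains (d : PySem.Dict String String) (k : String) :
    (d.items.map Prod.fst).contains k = d.contains k := by
  rw [PySem.Dict.contains]
  induction d.items with
  | nil => simp
  | cons p t ih =>
    simp only [List.map_cons, List.contains_cons, List.any_cons, ih]
    congr 1
    simp [eq_comm]

theorem pvItems_insert_fresh (d : PySem.Dict String String) (k v : String)
    (h : d.contains k = false) : (d.insert k v).items = d.items ++ [(k, v)] := by
  rw [PySem.Dict.insert, if_neg (by simp [h])]

theorem pvDedup_fold (l : List (List String × String)) : ∀ (d : PySem.Dict String String),
    ((l.map (fun st => [PySem.Str.join "" st.1, st.2])).foldl pvStepDedup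
        (d.items.map Prod.fst, d.items.map (fun kv => [kv.1, kv.2]))).2
      = (l.foldl (fun d st => d.setdefault (PySem.Str.join "" st.1) st.2) d).items.map
          (fun kv => [kv.1, kv.2]) := by
  induction l with
  | nil => intro d; simp
  | cons st t ih =>
    intro d
    rw [List.map_cons, List.foldl_cons, List.foldl_cons, pvStepDedup]
    have hkey : (PySem.List.pyGet? [PySem.Str.join "" st.1, st.2] 0).getD "" = PySem.Str.join "" st.1 := by
      simp [PySem.List.pyGet?, PySem.List.pyIdx?]
    rw [hkey]
    by_cases hc : d.contains (PySem.Str.join "" st.1) = true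
    · rw [if_pos (by rw [pvKeys_contains]; exact hc),
        PySem.Dict.setdefault_of_contains d st.2 hc]
      exact ih d
    · have hc' : d.contains (PySem.Str.join "" st.1) = false := by
        simpa using hc
      rw [if_neg (by rw [pvKeys_contains, hc']; simp),
        PySem.Dict.setdefault_of_not_contains d st.2 hc']
      have h2 := ih (d.insert (PySem.Str.join "" st.1) st.2)
      rw [pvItems_insert_fresh d _ st.2 hc'] at h2
      simpa using h2

theorem pvMain_eq (struct_list : List (List String × String)) :
    all_dot_brackets struct_list = all_dot_brackets_alt struct_list := by
  rw [all_dot_brackets, all_dot_brackets_alt]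
  rw [PySem.List.foldl_append_singleton_eq_map
    (fun struct => [struct.1.foldl (fun s e => s ++ e) "", struct.2]) struct_list []]
  rw [show struct_list.map (fun struct => [struct.1.foldl (fun s e => s ++ e) "", struct.2])
      = struct_list.map (fun st => [PySem.Str.join "" st.1, st.2]) from
    List.map_congr_left (fun st _ => by rw [pvFoldAppend_join])]
  rw [List.nil_append]
  rw [show (([] : List String), ([] : List (List String)))
      = (((PySem.Dict.empty : PySem.Dict String String)).items.map Prod.fst,
         ((PySem.Dict.empty : PySem.Dict String String)).items.map (fun kv => [kv.1, kv.2])) from rfl]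
  rw [pvDedup_fold struct_list PySem.Dict.empty]
  have hfi := PySem.List.foldl_append_if
    (fun ele : List String => loop_count ((PySem.List.pyGet? ele 0).getD "") == true)
    (id : List String → List String)
    (((struct_list.foldl (fun d st => d.setdefault (PySem.Str.join "" st.1) st.2)
        PySem.Dict.empty).items).map (fun kv => [kv.1, kv.2])) []
  simp only [id_eq] at hfi
  rw [hfi, List.filter_map, List.nil_append]
  have hfilter : List.filter
      ((fun ele => loop_count ((PySem.List.pyGet? ele 0).getD "") == true) ∘
        (fun kv : String × String => [kv.1, kv.2]))
      ((struct_list.foldl (fun d st => d.setdefault (PySem.Str.join "" st.1) st.2)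
        PySem.Dict.empty).items)
      = List.filter (fun kv => loop_count_alt kv.1)
        ((struct_list.foldl (fun d st => d.setdefault (PySem.Str.join "" st.1) st.2)
          PySem.Dict.empty).items) := by
    apply List.filter_congr
    intro kv _
    simp [Function.comp, PySem.List.pyGet?, PySem.List.pyIdx?, pvLoopCount_eq kv.1]
  rw [hfilter]
  simp

-- ===== VERDICT (by name: the statement is the Claim_ definition above) =====
theorem all_dot_brackets_spec : Claim_equal_all_dot_brackets := by
  intro struct_list _
  unfold Spec_all_dot_brackets
  exact pvMain_eq struct_list
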